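-- pv_equiv track=rewrite | github.com/kiranfor2004/NSE_Downloader | validate_and_correct_fo_data.py | extract_date_from_filename
-- ===== SOURCE A (Python) =====
-- def extract_date_from_filename(filename):
--     """Extract date from filename like BhavCopy_NSE_FO_0_0_0_20250203_F_0000.csv.zip"""
--     try:
--         parts = filename.split('_')
--         for part in parts:
--             if len(part) == 8 and part.startswith('202502'):
--                 return part
--     except:
--         pass
--     return None
-- ===== SOURCE B (Python) =====
-- def extract_date_from_filename(filename):
--     """Extract date from filename like BhavCopy_NSE_FO_0_0_0_20250203_F_0000.csv.zip"""
--     try: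
--         cur = []
--         for ch in filename:
--             if ch == '_':
--                 tok = ''.join(cur)
--                 if len(tok) == 8 and tok.startswith('202502'):
--                     return tok
--                 cur = []
--             else:
--                 cur.append(ch)
--         tok = ''.join(cur)
--         if len(tok) == 8 and tok.startswith('202502'):
--             return tok
--     except:
--         pass
--     return None
-- ===== Notes on version B (the rewrite author's own statement) =====
-- stated objective: alternative
-- what changed: Replaces splitting the filename into a materialized list of parts and then scanning that list with a single character-by-character pass that builds the current token and tests it at each delimiter, returning early without ever constructing the parts list.
import Mathlib
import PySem

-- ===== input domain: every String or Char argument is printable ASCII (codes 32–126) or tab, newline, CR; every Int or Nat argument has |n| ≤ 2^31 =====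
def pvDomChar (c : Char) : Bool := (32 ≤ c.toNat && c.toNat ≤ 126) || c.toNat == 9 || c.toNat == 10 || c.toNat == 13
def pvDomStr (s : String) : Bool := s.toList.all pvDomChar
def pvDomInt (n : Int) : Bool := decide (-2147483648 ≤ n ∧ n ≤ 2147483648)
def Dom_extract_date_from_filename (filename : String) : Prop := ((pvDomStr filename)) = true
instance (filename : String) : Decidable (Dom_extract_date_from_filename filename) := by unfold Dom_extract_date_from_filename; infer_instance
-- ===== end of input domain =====

-- B is an alternative single-pass tokenizer: it scans the characters once, testing the
-- current token at each '_' (and at the end), instead of materializing split('_') first.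

-- ===== PORT A =====
-- for part in parts: if len(part) == 8 and part.startswith('202502'): return part
def pvALoop : List (List Char) → Option String
  | [] => none
  | p :: rest =>
    if p.length == 8 && PySem.Chars.startswith p ['2','0','2','5','0','2'] then
      some (String.ofList p)
    else pvALoop rest

def extract_date_from_filename (filename : String) : Option String :=
  pvALoop (PySem.Chars.splitOn filename.toList ['_'])

-- ===== PORT B =====
-- cur holds the current token's characters in reverse (Python appends at the end)
def pvBLoop : List Char → List Char → Option String
  | cur, [] =>
    let tok := cur.reverse
    if tok.length == 8 && PySem.Chars.startswith tok ['2','0','2','5','0','2'] then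
      some (String.ofList tok)
    else none
  | cur, c :: rest =>
    if c == '_' then
      let tok := cur.reverse
      if tok.length == 8 && PySem.Chars.startswith tok ['2','0','2','5','0','2'] then
        some (String.ofList tok)
      else pvBLoop [] rest
    else pvBLoop (c :: cur) rest

def extract_date_from_filename_alt (filename : String) : Option String :=
  pvBLoop [] filename.toList

-- ===== PRECONDITION & SPEC =====
def Spec_extract_date_from_filename (filename : String) (out : Option String) : Prop := out = extract_date_from_filename_alt filename
instance (filename : String) (out : Option String) : Decidable (Spec_extract_date_from_filename filename out) := by unfold Spec_extract_date_from_filename; infer_instance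

-- ===== CLAIM (what is proved, stated in full; the proofs are below) =====
def Claim_equal_extract_date_from_filename : Prop := ∀ (filename : String), Dom_extract_date_from_filename filename → Spec_extract_date_from_filename filename (extract_date_from_filename filename)

-- ===== LEMMAS AND PROOFS =====
theorem pvALoop_append (xs ys : List (List Char)) :
    pvALoop (xs ++ ys) = (pvALoop xs).or (pvALoop ys) := by
  induction xs with
  | nil => simp [pvALoop]
  | cons p rest ih =>
    simp only [List.cons_append, pvALoop]
    split_ifs <;> simp [ih]

theorem pvBLoop_nil (cur : List Char) : pvBLoop cur [] = pvALoop [cur.reverse] := by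
  simp only [pvBLoop, pvALoop]

theorem pvBLoop_underscore (cur rest : List Char) :
    pvBLoop cur ('_' :: rest) = (pvALoop [cur.reverse]).or (pvBLoop [] rest) := by
  simp only [pvBLoop, pvALoop, beq_self_eq_true, if_true]
  split_ifs <;> simp

theorem pvBLoop_cons (c : Char) (cur rest : List Char) (hc : (c == '_') = false) :
    pvBLoop cur (c :: rest) = pvBLoop (c :: cur) rest := by
  simp only [pvBLoop, hc, Bool.false_eq_true, if_false]

theorem pvKey : ∀ (fuel : Nat) (l cur : List Char) (acc : List (List Char)),
    l.length < fuel →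
    pvALoop (PySem.Chars.splitOn.go ['_'] fuel l cur acc) =
      (pvALoop acc.reverse).or (pvBLoop cur l) := by
  intro fuel
  induction fuel with
  | zero => intro l cur acc h; omega
  | succ f ih =>
    intro l cur acc h
    cases l with
    | nil =>
      simp only [PySem.Chars.splitOn.go]
      rw [List.reverse_cons, pvALoop_append, pvBLoop_nil]
    | cons c rest =>
      by_cases hc : c = '_'
      · subst hc
        have hp : (['_'] : List Char).isPrefixOf ('_' :: rest) = true := by
          simp [List.isPrefixOf]
        simp only [PySem.Chars.splitOn.go, hp, if_true, List.length_cons, List.length_nil,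
          List.drop_succ_cons, List.drop_zero]
        rw [ih rest [] (cur.reverse :: acc) (by simp at h ⊢; omega),
          List.reverse_cons, pvALoop_append, pvBLoop_underscore, Option.or_assoc]
      · have hp : (['_'] : List Char).isPrefixOf (c :: rest) = false := by
          simp [List.isPrefixOf]
          exact fun hh => hc hh.symm
        simp only [PySem.Chars.splitOn.go, hp, Bool.false_eq_true, if_false]
        rw [ih rest (c :: cur) acc (by simp at h ⊢; omega),
          pvBLoop_cons c cur rest (by simp [hc])]

-- ===== VERDICT (by name: the statement is the Claim_ definition above) =====
theorem extract_date_from_filename_spec : Claim_equal_extract_date_from_filename := by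
  intro filename _
  show extract_date_from_filename filename = extract_date_from_filename_alt filename
  unfold extract_date_from_filename extract_date_from_filename_alt PySem.Chars.splitOn
  rw [pvKey (filename.toList.length + 1) filename.toList [] [] (by omega)]
  simp [pvALoop]
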